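-- pv_equiv track=rewrite | github.com/fruizt/cryptography-app | back_py/app/controller/classic_controller/permutation_controller.py | convertMatrixKey
-- ===== SOURCE A (Python) =====
-- def convertMatrixKey(key):
--     key=key.replace(",","")
--     m=int(len(key)**0.5)
--     block = [key[i:i+m] for i in range(0,len(key),m)]
--
--     rest=[["0"]*m for i in range(m)]
--     for i in range(m):
--         for j in range(m):
--             rest[j][i]=block[i][j]
--
--     keyMatix=""
--     for i in rest:
--         keyMatix+=str(i.index("1")+1)
--
--     return keyMatix
-- ===== SOURCE B (Python) =====
-- def convertMatrixKey(key):
--     s = key.replace(",", "")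
--     m = int(len(s) ** 0.5)
--     res = [None] * m
--     for pos, ch in enumerate(s[:m * m]):
--         if ch == "1" and res[pos % m] is None:
--             res[pos % m] = pos // m + 1
--     if not s or None in res:
--         raise ValueError("key is not a permutation matrix")
--     return "".join(str(x) for x in res)
-- ===== Notes on version B (the rewrite author's own statement) =====
-- stated objective: simpler
-- what changed: B replaces A's materialized transpose (build row blocks, copy into an m x m transposed matrix with nested loops, then rescan each column with .index) by a single left-to-right pass over the comma-stripped string that records, per column pos mod m, the first row holding the digit one; B validates at the end and raises ValueError exactly where A raises.
import Mathlib
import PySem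

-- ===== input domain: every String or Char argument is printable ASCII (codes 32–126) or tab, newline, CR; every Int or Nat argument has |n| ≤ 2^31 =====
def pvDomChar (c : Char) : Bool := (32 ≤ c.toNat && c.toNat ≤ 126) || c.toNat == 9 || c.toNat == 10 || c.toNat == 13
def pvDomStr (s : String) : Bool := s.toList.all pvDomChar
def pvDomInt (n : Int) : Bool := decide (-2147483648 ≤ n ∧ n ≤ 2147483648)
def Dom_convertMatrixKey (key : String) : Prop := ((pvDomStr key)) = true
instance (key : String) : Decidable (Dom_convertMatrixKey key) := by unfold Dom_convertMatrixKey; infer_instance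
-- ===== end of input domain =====

-- B does one pass over the comma-stripped key instead of A's transpose-then-rescan; return values proved equal wherever A returns.

-- ===== PORT A =====
-- shared numeric primitive for both ports: int(x ** 0.5) on a Nat x, kernel-transparent;
-- exact wherever the float square root rounds to the true integer square root.
def pyIntSqrt (n : Nat) : Nat :=
  ((List.range (n + 1)).takeWhile (fun k => k * k ≤ n)).length - 1

-- int(len(key)**0.5) is ported as pyIntSqrt: exact for every length at which the float square root is exact.
-- Where Python A raises (empty stripped key: range step 0; a column without '1': .index ValueError) the port
-- uses total stand-ins (pyRange with step 0, Option.getD); those inputs are excluded by Pre_convertMatrixKey.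
def convertMatrixKey (key : String) : String :=
  let cs : List Char := PySem.Chars.replace key.toList [','] []
  let m : Nat := pyIntSqrt cs.length
  let block : List (List Char) :=
    (PySem.List.pyRange 0 (cs.length : Int) (m : Int)).map
      (fun i => PySem.List.slice cs (some i) (some (i + (m : Int))))
  let rest : List (List Char) :=
    (PySem.List.pyRange 0 (m : Int) 1).foldl (fun rest i =>
      (PySem.List.pyRange 0 (m : Int) 1).foldl (fun rest j =>
        PySem.List.pySetD rest j
          (PySem.List.pySetD (PySem.List.pyGetD rest j []) i
            (PySem.List.pyGetD (PySem.List.pyGetD block i []) j '0'))) rest)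
      (List.replicate m (List.replicate m '0'))
  let keyMatix : List Char :=
    rest.foldl (fun acc row =>
      acc ++ PySem.Int.toChars (((PySem.List.index? row '1').getD 0 : Int) + 1)) []
  String.ofList keyMatix

-- ===== PORT B =====
-- Source B raises ValueError on an empty stripped key or a column without the digit one (the same inputs on
-- which A raises); those inputs are excluded by Pre_convertMatrixKey and the port simply returns
-- the unvalidated join there.
def convertMatrixKey_alt (key : String) : String :=
  let cs : List Char := PySem.Chars.replace key.toList [','] []
  let m : Nat := pyIntSqrt cs.length
  let res : List (Option Int) :=
    (PySem.List.enumerate (PySem.List.slice cs none (some ((m : Int) * (m : Int)))) 0).foldl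
      (fun res p =>
        if p.2 = '1' ∧ PySem.List.pyGetD res (PySem.Int.mod p.1 (m : Int)) none = none then
          PySem.List.pySetD res (PySem.Int.mod p.1 (m : Int))
            (some (PySem.Int.floordiv p.1 (m : Int) + 1))
        else res)
      (List.replicate m none)
  String.ofList (PySem.Chars.join []
    (res.map (fun o => match o with
      | some v => PySem.Int.toChars v
      | none => "None".toList)))

-- ===== PRECONDITION & SPEC =====
-- Pre_ excludes exactly the inputs on which Python A raises: an empty comma-stripped key
-- (range(0, 0, 0) → ValueError) and keys where some column of the m×m block lacks the digit one
-- (.index → ValueError).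
def Pre_convertMatrixKey (key : String) : Prop :=
  let cs : List Char := PySem.Chars.replace key.toList [','] []
  let m : Nat := pyIntSqrt cs.length
  cs ≠ [] ∧ ∀ j < m, ∃ i < m, cs.getD (i * m + j) '0' = '1'
instance (key : String) : Decidable (Pre_convertMatrixKey key) := by
  unfold Pre_convertMatrixKey; infer_instance

def pvWitness_convertMatrixKey : String := "010,001,100"

def Spec_convertMatrixKey (key : String) (out : String) : Prop := out = convertMatrixKey_alt key
instance (key : String) (out : String) : Decidable (Spec_convertMatrixKey key out) := by
  unfold Spec_convertMatrixKey; infer_instance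

-- ===== CLAIM (what is proved, stated in full; the proofs are below) =====
def Claim_equal_convertMatrixKey : Prop := ∀ (key : String), Dom_convertMatrixKey key → Pre_convertMatrixKey key → Spec_convertMatrixKey key (convertMatrixKey key)

-- ===== LEMMAS AND PROOFS =====

-- generic helpers ----------------------------------------------------------
theorem pv_set_map_range {α : Type} (f : Nat → α) (m j0 : Nat) (x : α) :
    ((List.range m).map f).set j0 x
      = (List.range m).map (fun j => if j = j0 then x else f j) := by
  apply List.ext_getElem (by simp)
  intro i h1 h2
  simp only [List.getElem_set, List.getElem_map, List.getElem_range]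
  by_cases hij : i = j0 <;> simp [hij, eq_comm]
  intro h; exact absurd h.symm hij

theorem pv_getD_map_range {α : Type} (f : Nat → α) (m j : Nat) (hj : j < m) (d : α) :
    ((List.range m).map f).getD j d = f j := by
  simp [List.getD_eq_getElem?_getD, hj]

-- A side: the nested transpose loops ---------------------------------------
theorem pv_innerA (m t : Nat) (b : Nat → Char) (L : List Nat) (hnd : L.Nodup)
    (hb : ∀ j ∈ L, j < m) (f : Nat → List Char) :
    L.foldl (fun rest j => rest.set j ((rest.getD j []).set t (b j)))
        ((List.range m).map f)
      = (List.range m).map (fun j => if j ∈ L then (f j).set t (b j) else f j) := by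
  induction L generalizing f with
  | nil => simp
  | cons j0 L ih =>
    have hj0 : j0 < m := hb j0 (by simp)
    have hnd' : L.Nodup := hnd.of_cons
    have hj0L : j0 ∉ L := by
      intro hmem; exact (List.nodup_cons.mp hnd).1 hmem
    simp only [List.foldl_cons]
    rw [pv_getD_map_range f m j0 hj0, pv_set_map_range,
        ih hnd' (fun j hj => hb j (by simp [hj]))]
    apply List.map_congr_left
    intro j hj
    by_cases hjL : j ∈ L
    · have hne : j ≠ j0 := fun h => hj0L (h ▸ hjL)
      simp [hjL, hne]
    · by_cases hje : j = j0 <;> simp [hjL, hje]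

theorem pv_outerA (m : Nat) (b : Nat → Nat → Char) :
    ∀ k, k ≤ m →
    (List.range k).foldl (fun rest t =>
        (List.range m).foldl (fun rest j =>
          rest.set j ((rest.getD j []).set t (b t j))) rest)
      (List.replicate m (List.replicate m '0'))
      = (List.range m).map (fun j =>
          (List.range k).map (fun t => b t j) ++ List.replicate (m - k) '0') := by
  intro k
  induction k with
  | zero =>
    intro _
    simp [List.map_const']
  | succ k ih =>
    intro hk1
    have hk : k ≤ m := Nat.le_of_succ_le hk1
    rw [List.range_succ, List.foldl_append, ih hk, List.foldl_cons, List.foldl_nil,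
        pv_innerA m k (fun j => b k j) (List.range m) (List.nodup_range)
          (fun j hj => List.mem_range.mp hj)]
    apply List.map_congr_left
    intro j hj
    have hjm : j < m := List.mem_range.mp hj
    simp only [hj, if_pos]
    rw [List.set_append]
    have hlen : ((List.range k).map (fun t => b t j)).length = k := by simp
    rw [hlen, if_neg (lt_irrefl k), Nat.sub_self]
    have hrep : m - k = (m - (k + 1)) + 1 := by omega
    rw [hrep, List.replicate_succ, List.set_cons_zero]
    simp

theorem pv_blockElem (cs : List Char) (m t j : Nat) (hm0 : 0 < m)
    (hmn : m * m ≤ cs.length) (ht : t < m) (hj : j < m) :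
    (((PySem.List.pyRange 0 (cs.length : Int) (m : Int)).map
        (fun i => PySem.List.slice cs (some i) (some (i + (m : Int))))).getD t []).getD j '0'
      = cs.getD (t * m + j) '0' := by
  have hm0' : (0 : Int) < (m : Int) := by exact_mod_cast hm0
  have h11 : 1 * 1 ≤ m * m := Nat.mul_le_mul hm0 hm0
  have hn : 0 < cs.length := by omega
  rw [PySem.List.pyRange_of_pos 0 (cs.length : Int) hm0']
  rw [if_pos (by exact_mod_cast hn)]
  have hcast : ((cs.length : Int) - 0 + (m : Int) - 1) = ((cs.length + m - 1 : Nat) : Int) := by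
    push_cast [Nat.cast_sub (by omega : 1 ≤ cs.length + m)]
    ring
  rw [hcast, ← Int.natCast_div, Int.toNat_natCast]
  have htm2 : t * m + j < cs.length := by
    have : t * m + j < m * m := by
      calc t * m + j < t * m + m := by omega
        _ = (t + 1) * m := by ring
        _ ≤ m * m := Nat.mul_le_mul_right m (by omega)
    omega
  have hK : t < (cs.length + m - 1) / m := by
    have hmle : m ≤ (cs.length + m - 1) / m :=
      (Nat.le_div_iff_mul_le hm0).mpr (by omega)
    omega
  rw [List.map_map, pv_getD_map_range _ _ t hK]
  simp only [Function.comp_apply]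
  have harg : (0 + (m : Int) * (t : Int)) = ((t * m : Nat) : Int) := by push_cast; ring
  rw [harg]
  have harg2 : (((t * m : Nat) : Int) + (m : Int)) = (((t * m : Nat) : Int) + ((m : Nat) : Int)) := rfl
  rw [harg2, PySem.List.slice_natCast_add cs (t * m) m]
  simp [List.getD_eq_getElem?_getD, List.getElem?_drop, hj]

-- B side --------------------------------------------------------------------
theorem pv_enumerate_eq_map {α : Type} (d : α) (cs : List α) :
    ∀ s : Int, PySem.List.enumerate cs s
      = (List.range cs.length).map (fun (k : Nat) => (s + (k : Int), cs.getD k d)) := by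
  induction cs with
  | nil => intro s; simp [PySem.List.enumerate_nil]
  | cons x xs ih =>
    intro s
    rw [PySem.List.enumerate_cons, ih (s + 1)]
    simp only [List.length_cons, List.range_succ_eq_map, List.map_cons, List.map_map]
    congr 1
    · simp
    · apply List.map_congr_left
      intro k _
      simp only [Function.comp_apply, Nat.succ_eq_add_one, List.getD_cons_succ]
      have hs : s + 1 + (k : Int) = s + ((k + 1 : Nat) : Int) := by push_cast; ring
      rw [hs]

theorem pv_fmod_row (t j m : Nat) (hj : j < m) :
    PySem.Int.mod ((t * m + j : Nat) : Int) (m : Int) = (j : Int) := by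
  have hm0' : (0 : Int) ≤ (m : Int) := by positivity
  show Int.fmod _ _ = _
  rw [Int.fmod_eq_emod, if_pos (Or.inl hm0'), add_zero]
  have : ((t * m + j : Nat) : Int) = (j : Int) + (m : Int) * (t : Int) := by push_cast; ring
  rw [this, Int.add_mul_emod_self_left,
      Int.emod_eq_of_lt (by positivity) (by exact_mod_cast hj)]

theorem pv_fdiv_row (t j m : Nat) (hj : j < m) :
    PySem.Int.floordiv ((t * m + j : Nat) : Int) (m : Int) = (t : Int) := by
  have hm0' : (0 : Int) ≤ (m : Int) := by positivity
  have hmne : (m : Int) ≠ 0 := by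
    have : 0 < m := by omega
    exact_mod_cast this.ne'
  show Int.fdiv _ _ = _
  rw [Int.fdiv_eq_ediv, if_pos (Or.inl hm0'), sub_zero]
  have : ((t * m + j : Nat) : Int) = (j : Int) + (m : Int) * (t : Int) := by push_cast; ring
  rw [this, Int.add_mul_ediv_left _ _ hmne,
      Int.ediv_eq_zero_of_lt (by positivity) (by exact_mod_cast hj), zero_add]

theorem pv_rowB (m t : Nat) (c : Nat → Char) (L : List Nat) (hnd : L.Nodup)
    (hb : ∀ j ∈ L, j < m) (g : Nat → Option Int) :
    (L.map (fun j => (((t * m + j : Nat) : Int), c j))).foldl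
        (fun res p =>
          if p.2 = '1' ∧ PySem.List.pyGetD res (PySem.Int.mod p.1 (m : Int)) none = none then
            PySem.List.pySetD res (PySem.Int.mod p.1 (m : Int))
              (some (PySem.Int.floordiv p.1 (m : Int) + 1))
          else res)
        ((List.range m).map g)
      = (List.range m).map (fun j =>
          if j ∈ L ∧ g j = none ∧ c j = '1' then some ((t : Int) + 1) else g j) := by
  induction L generalizing g with
  | nil => simp
  | cons j0 L ih =>
    have hj0 : j0 < m := hb j0 (by simp)
    have hj0L : j0 ∉ L := (List.nodup_cons.mp hnd).1
    have hnd' : L.Nodup := hnd.of_cons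
    have hb' : ∀ j ∈ L, j < m := fun j hj => hb j (by simp [hj])
    simp only [List.map_cons, List.foldl_cons, pv_fmod_row t j0 m hj0,
      pv_fdiv_row t j0 m hj0, PySem.List.pyGetD_natCast, PySem.List.pySetD_natCast,
      pv_getD_map_range g m j0 hj0]
    by_cases hcond : c j0 = '1' ∧ g j0 = none
    · rw [if_pos hcond, pv_set_map_range, ih hnd' hb']
      apply List.map_congr_left
      intro j hj
      by_cases hje : j = j0
      · subst hje
        simp [List.mem_cons, hj0L, hcond.1, hcond.2]
      · by_cases hjL : j ∈ L <;> simp [List.mem_cons, hje, hjL]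
    · rw [if_neg hcond, ih hnd' hb']
      apply List.map_congr_left
      intro j hj
      by_cases hje : j = j0
      · subst hje
        rw [if_neg, if_neg]
        · rintro ⟨-, h1, h2⟩; exact hcond ⟨h2, h1⟩
        · rintro ⟨hmem, -⟩; exact hj0L hmem
      · simp only [List.mem_cons, hje, false_or]

theorem pv_outerB (cs : List Char) (m : Nat) (hmn : m * m ≤ cs.length) :
    ∀ r, r ≤ m →
    (PySem.List.enumerate (cs.take (r * m)) 0).foldl
        (fun res p =>
          if p.2 = '1' ∧ PySem.List.pyGetD res (PySem.Int.mod p.1 (m : Int)) none = none then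
            PySem.List.pySetD res (PySem.Int.mod p.1 (m : Int))
              (some (PySem.Int.floordiv p.1 (m : Int) + 1))
          else res)
        (List.replicate m none)
      = (List.range m).map (fun j =>
          ((List.range r).find? (fun t => cs.getD (t * m + j) '0' == '1')).map
            (fun t => (t : Int) + 1)) := by
  intro r
  induction r with
  | zero =>
    intro _
    simp [PySem.List.enumerate_nil, List.map_const']
  | succ r ih =>
    intro hr1
    have hr : r ≤ m := Nat.le_of_succ_le hr1
    have hrm : r * m ≤ cs.length :=
      le_trans (Nat.mul_le_mul_right m hr) hmn
    have hrm1 : r * m + m ≤ cs.length :=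
      le_trans (by calc r * m + m = (r + 1) * m := by ring
                      _ ≤ m * m := Nat.mul_le_mul_right m hr1) hmn
    have hmul : (r + 1) * m = r * m + m := by ring
    rw [hmul, List.take_add, PySem.List.enumerate_append, List.foldl_append, ih hr]
    have hlen : (cs.take (r * m)).length = r * m := by
      simp [List.length_take, Nat.min_eq_left hrm]
    rw [hlen]
    have hrow : PySem.List.enumerate (List.take m (List.drop (r * m) cs)) (0 + (r * m : Nat))
        = (List.range m).map (fun j => (((r * m + j : Nat) : Int), cs.getD (r * m + j) '0')) := by
      rw [pv_enumerate_eq_map '0']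
      have hrowlen : (List.take m (List.drop (r * m) cs)).length = m := by
        simp [List.length_take, List.length_drop]
        omega
      rw [hrowlen]
      apply List.map_congr_left
      intro k hk
      have hkm : k < m := List.mem_range.mp hk
      simp only [Prod.mk.injEq]
      refine ⟨by push_cast; ring,
        by simp [List.getD_eq_getElem?_getD, hkm, List.getElem?_drop]⟩
    rw [hrow, pv_rowB m r (fun j => cs.getD (r * m + j) '0') (List.range m)
        List.nodup_range (fun j hj => List.mem_range.mp hj)]
    apply List.map_congr_left
    intro j hj
    rw [List.range_succ, List.find?_append]
    cases hf : (List.range r).find? (fun t => cs.getD (t * m + j) '0' == '1') with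
    | some v =>
      simp [hj]
    | none =>
      simp [hj]
      by_cases hc : cs[r * m + j]?.getD '0' = '1' <;> simp [hc]

-- column scan: first index in the column list = first row found ------------
theorem pv_idxOf_map_range' (v : Nat → Char) :
    ∀ (n s : Nat), List.idxOf? '1' ((List.range' s n).map v)
      = (List.find? (fun t => v t == '1') (List.range' s n)).map (· - s) := by
  intro n
  induction n with
  | zero => intro s; simp
  | succ n ih =>
    intro s
    rw [List.range'_succ, List.map_cons, List.idxOf?_cons, List.find?_cons]
    by_cases h : v s = '1'
    · simp [h]
    · have hb : (v s == '1') = false := by simp [h]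
      rw [hb]
      simp only [Bool.false_eq_true, if_false]
      rw [ih (s + 1)]
      cases hf : List.find? (fun t => v t == '1') (List.range' (s + 1) n) with
      | none => simp
      | some u =>
        have hu : s + 1 ≤ u := (List.mem_range'_1.mp (List.mem_of_find?_eq_some hf)).1
        simp only [Option.map_some]
        congr 1
        omega

theorem pv_join_nil_flatten (ps : List (List Char)) :
    PySem.Chars.join [] ps = ps.flatten := by
  induction ps with
  | nil => simp [PySem.Chars.join_nil]
  | cons p ps ih =>
    cases ps with
    | nil => simp [PySem.Chars.join_singleton]
    | cons q rest =>
      rw [PySem.Chars.join_cons_cons]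
      simp only [List.flatten_cons]
      rw [ih]
      simp

-- pyIntSqrt agrees with Nat.sqrt ---------------------------------------------
theorem pv_takeWhile_range'_len (p : Nat → Bool) (K : Nat)
    (hp : ∀ k, p k = decide (k < K)) :
    ∀ (c s : Nat), ((List.range' s c).takeWhile p).length = min c (K - s) := by
  intro c
  induction c with
  | zero => intro s; simp
  | succ c ih =>
    intro s
    rw [List.range'_succ, List.takeWhile_cons]
    by_cases hs : s < K
    · rw [if_pos (by rw [hp]; exact decide_eq_true hs)]
      simp only [List.length_cons, ih (s + 1)]
      omega
    · rw [if_neg (by rw [hp]; simp [hs])]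
      simp only [List.length_nil]
      omega

theorem pyIntSqrt_eq_sqrt (n : Nat) : pyIntSqrt n = Nat.sqrt n := by
  unfold pyIntSqrt
  rw [List.range_eq_range',
    pv_takeWhile_range'_len (fun k => k * k ≤ n) (Nat.sqrt n + 1)
      (fun k => by simp [Nat.le_sqrt]) (n + 1) 0]
  have := Nat.sqrt_le_self n
  omega

-- main ----------------------------------------------------------------------
theorem convertMatrixKey_eq (key : String) (h : Pre_convertMatrixKey key) :
    convertMatrixKey key = convertMatrixKey_alt key := by
  obtain ⟨hne, hcol⟩ := h
  unfold convertMatrixKey convertMatrixKey_alt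
  dsimp only
  set cs : List Char := PySem.Chars.replace key.toList [','] [] with hcs
  set m : Nat := pyIntSqrt cs.length with hm
  have hmsq : m = Nat.sqrt cs.length := pyIntSqrt_eq_sqrt cs.length
  have hm0 : 0 < m := hmsq ▸ Nat.sqrt_pos.mpr (List.length_pos_of_ne_nil hne)
  have hmn : m * m ≤ cs.length := by rw [hmsq]; exact Nat.sqrt_le cs.length
  apply congrArg String.ofList
  -- normalize the A side
  rw [PySem.List.pyRange_one 0 (m : Int)]
  simp only [sub_zero, Int.toNat_natCast, List.foldl_map, zero_add,
    PySem.List.pySetD_natCast, PySem.List.pyGetD_natCast]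
  rw [pv_outerA m
      (fun t j => (((PySem.List.pyRange 0 (cs.length : Int) (m : Int)).map
        (fun i => PySem.List.slice cs (some i) (some (i + (m : Int))))).getD t []).getD j '0')
      m le_rfl]
  simp only [Nat.sub_self, List.replicate_zero, List.append_nil]
  rw [PySem.List.foldl_append_eq_flatMap, List.nil_append, List.flatMap_map,
    List.flatMap_def]
  -- normalize the B side
  have hmm : ((m : Int) * (m : Int)) = ((m * m : Nat) : Int) := by push_cast; ring
  rw [hmm, PySem.List.slice_to_natCast, pv_outerB cs m hmn m le_rfl,
    pv_join_nil_flatten, List.map_map]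
  -- columnwise comparison
  apply congrArg List.flatten
  apply List.map_congr_left
  intro j hj
  have hjm : j < m := List.mem_range.mp hj
  simp only [Function.comp_apply]
  have hcolA : (List.range m).map
      (fun t => (((PySem.List.pyRange 0 (cs.length : Int) (m : Int)).map
        (fun i => PySem.List.slice cs (some i) (some (i + (m : Int))))).getD t []).getD j '0')
      = (List.range m).map (fun t => cs.getD (t * m + j) '0') := by
    apply List.map_congr_left
    intro t ht
    exact pv_blockElem cs m t j hm0 hmn (List.mem_range.mp ht) hjm
  rw [hcolA]
  obtain ⟨i, him, hi1⟩ := hcol j hjm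
  have hfind : ((List.range m).find? (fun t => cs.getD (t * m + j) '0' == '1')).isSome := by
    rw [List.find?_isSome]
    refine ⟨i, List.mem_range.mpr him, ?_⟩
    simp only [beq_iff_eq]
    exact hi1
  obtain ⟨i0, hf⟩ := Option.isSome_iff_exists.mp hfind
  rw [PySem.List.index?_eq_idxOf?, List.range_eq_range', pv_idxOf_map_range',
    ← List.range_eq_range', hf]
  simp

-- ===== VERDICT (by name: the statement is the Claim_ definition above) =====
theorem convertMatrixKey_spec : Claim_equal_convertMatrixKey := by
  intro key _ hpre
  exact convertMatrixKey_eq key hpre
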